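-- pv_equiv track=rewrite | github.com/St-Lucifer0/HUI_Mining | hui_miner_helpers.py | build_local_header_info
-- ===== SOURCE A (Python) =====
-- def build_local_header_info(projected_db_for_prefix_p, item_utils):
--     """
--     Analyzes a projected_db (for a Prefix P) to find unique items 'j' in its prefixes
--     and estimates their relevant utilities if P U {j} is formed.
--     Output: {item_j: {'total_utility_as_next': val, 'potential_utility_if_chosen': val, 'count_in_paths': val}}
--     """
--     local_header = {}
--     for further_prefix_items_set, utility_of_p_in_that_path, path_count in projected_db_for_prefix_p:
--         for item_j_in_further_prefix in further_prefix_items_set: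
--             if item_j_in_further_prefix not in local_header:
--                 local_header[item_j_in_further_prefix] = {
--                     'total_utility_as_next': 0,
--                     'potential_utility_if_chosen': 0,
--                     'count_in_paths': 0
--                 }
--
--             utility_of_j_segment = item_utils.get(item_j_in_further_prefix, 0) * path_count
--             local_header[item_j_in_further_prefix]['total_utility_as_next'] += (
--                 utility_of_j_segment + utility_of_p_in_that_path
--             )
--             local_header[item_j_in_further_prefix]['count_in_paths'] += path_count
--
--             current_path_potential_for_j = utility_of_j_segment + utility_of_p_in_that_path
--             for other_item in further_prefix_items_set:
--                 if other_item != item_j_in_further_prefix: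
--                     current_path_potential_for_j += item_utils.get(other_item, 0) * path_count
--             local_header[item_j_in_further_prefix]['potential_utility_if_chosen'] += current_path_potential_for_j
--     return local_header
-- ===== SOURCE B (Python) =====
-- def build_local_header_info(projected_db_for_prefix_p, item_utils):
--     """Same aggregation, one pass per path: a per-path Counter and total utility
--     are precomputed once, so the quadratic inner rescan disappears."""
--     acc = {}
--     for path_items, utility_of_p, path_count in projected_db_for_prefix_p:
--         counts = {}
--         path_util = 0
--         for x in path_items:
--             counts[x] = counts.get(x, 0) + 1
--             path_util += item_utils.get(x, 0)
--         for j in path_items: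
--             uj = item_utils.get(j, 0)
--             base = uj * path_count + utility_of_p
--             pot = base + (path_util - counts[j] * uj) * path_count
--             t, p, c = acc.get(j, (0, 0, 0))
--             acc[j] = (t + base, p + pot, c + path_count)
--     return {j: {'total_utility_as_next': t,
--                 'potential_utility_if_chosen': p,
--                 'count_in_paths': c} for j, (t, p, c) in acc.items()}
-- ===== Notes on version B (the rewrite author's own statement) =====
-- stated objective: faster
-- what changed: Per path, a counter and the path's total item utility are computed once and each item's potential comes from the closed form base + (path_util - count[j]*util_j)*path_count, removing A's inner rescan over the path for every item.
import Mathlib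
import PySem

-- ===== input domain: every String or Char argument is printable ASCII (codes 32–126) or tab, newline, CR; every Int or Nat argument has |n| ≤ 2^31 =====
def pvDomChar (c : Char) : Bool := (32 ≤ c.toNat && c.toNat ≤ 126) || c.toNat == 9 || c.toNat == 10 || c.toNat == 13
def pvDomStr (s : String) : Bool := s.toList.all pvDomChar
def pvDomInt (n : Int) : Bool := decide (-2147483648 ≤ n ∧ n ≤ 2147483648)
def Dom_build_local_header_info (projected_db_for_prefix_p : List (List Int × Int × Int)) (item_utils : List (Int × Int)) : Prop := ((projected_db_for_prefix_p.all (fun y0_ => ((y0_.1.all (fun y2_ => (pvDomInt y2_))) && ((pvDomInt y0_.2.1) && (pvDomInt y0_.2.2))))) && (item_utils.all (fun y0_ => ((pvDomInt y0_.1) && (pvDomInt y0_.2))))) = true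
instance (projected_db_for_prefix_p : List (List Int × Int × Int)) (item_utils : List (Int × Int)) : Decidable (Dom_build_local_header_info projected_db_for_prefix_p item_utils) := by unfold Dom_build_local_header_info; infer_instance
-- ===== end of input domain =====

-- B precomputes each path's counter and total item utility once, replacing A's inner rescan per item (asymptotically faster).


-- ===== PORT A =====
def build_local_header_info (projected_db_for_prefix_p : List (List Int × Int × Int)) (item_utils : List (Int × Int)) : List (Int × List (String × Int)) :=
  ((projected_db_for_prefix_p.foldl (fun local_header row =>
      match row with
      | (further_prefix_items_set, utility_of_p_in_that_path, path_count) =>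
        further_prefix_items_set.foldl (fun local_header item_j =>
          let local_header :=
            if local_header.contains item_j then local_header
            else local_header.insert item_j (PySem.Dict.mk
              [("total_utility_as_next", (0 : Int)),
               ("potential_utility_if_chosen", (0 : Int)),
               ("count_in_paths", (0 : Int))])
          let utility_of_j_segment := (PySem.Dict.mk item_utils).getD item_j 0 * path_count
          let local_header := local_header.modify item_j PySem.Dict.empty
            (fun e => e.modify "total_utility_as_next" 0 (· + (utility_of_j_segment + utility_of_p_in_that_path)))
          let local_header := local_header.modify item_j PySem.Dict.empty
            (fun e => e.modify "count_in_paths" 0 (· + path_count))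
          let current_path_potential_for_j :=
            further_prefix_items_set.foldl (fun acc other_item =>
              if other_item ≠ item_j then acc + (PySem.Dict.mk item_utils).getD other_item 0 * path_count
              else acc) (utility_of_j_segment + utility_of_p_in_that_path)
          local_header.modify item_j PySem.Dict.empty
            (fun e => e.modify "potential_utility_if_chosen" 0 (· + current_path_potential_for_j)))
          local_header)
    (PySem.Dict.empty : PySem.Dict Int (PySem.Dict String Int))).items.map
    (fun p => (p.1, p.2.items)))

-- ===== PORT B =====
def build_local_header_info_alt (projected_db_for_prefix_p : List (List Int × Int × Int)) (item_utils : List (Int × Int)) : List (Int × List (String × Int)) :=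
  ((projected_db_for_prefix_p.foldl (fun acc row =>
      match row with
      | (path_items, utility_of_p, path_count) =>
        let cp := path_items.foldl
          (fun (st : PySem.Dict Int Int × Int) x =>
            (st.1.insert x (st.1.getD x 0 + 1), st.2 + (PySem.Dict.mk item_utils).getD x 0))
          (PySem.Dict.empty, 0)
        let counts := cp.1
        let path_util := cp.2
        path_items.foldl (fun acc j =>
          let uj := (PySem.Dict.mk item_utils).getD j 0
          let base := uj * path_count + utility_of_p
          let pot := base + (path_util - counts.getD j 0 * uj) * path_count
          let t := acc.getD j ((0 : Int), (0 : Int), (0 : Int))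
          acc.insert j (t.1 + base, t.2.1 + pot, t.2.2 + path_count)) acc)
    (PySem.Dict.empty : PySem.Dict Int (Int × Int × Int))).items.map
    (fun p => (p.1, [("total_utility_as_next", p.2.1),
                     ("potential_utility_if_chosen", p.2.2.1),
                     ("count_in_paths", p.2.2.2)])))

-- ===== PRECONDITION & SPEC =====
def Spec_build_local_header_info (projected_db_for_prefix_p : List (List Int × Int × Int)) (item_utils : List (Int × Int)) (out : List (Int × List (String × Int))) : Prop := out = build_local_header_info_alt projected_db_for_prefix_p item_utils
instance (projected_db_for_prefix_p : List (List Int × Int × Int)) (item_utils : List (Int × Int)) (out : List (Int × List (String × Int))) : Decidable (Spec_build_local_header_info projected_db_for_prefix_p item_utils out) := by unfold Spec_build_local_header_info; infer_instance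

-- ===== CLAIM (what is proved, stated in full; the proofs are below) =====
def Claim_equal_build_local_header_info : Prop := ∀ (projected_db_for_prefix_p : List (List Int × Int × Int)) (item_utils : List (Int × Int)), Dom_build_local_header_info projected_db_for_prefix_p item_utils → Spec_build_local_header_info projected_db_for_prefix_p item_utils (build_local_header_info projected_db_for_prefix_p item_utils)

-- ===== LEMMAS AND PROOFS =====
def encT (t : Int × Int × Int) : PySem.Dict String Int :=
  PySem.Dict.mk [("total_utility_as_next", t.1), ("potential_utility_if_chosen", t.2.1), ("count_in_paths", t.2.2)]

def absD (d : PySem.Dict Int (Int × Int × Int)) : PySem.Dict Int (PySem.Dict String Int) :=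
  PySem.Dict.mk (d.items.map (fun p => (p.1, encT p.2)))

theorem absD_contains (d : PySem.Dict Int (Int × Int × Int)) (j : Int) :
    (absD d).contains j = d.contains j := by
  simp [absD, PySem.Dict.contains, List.any_map, Function.comp_def]

theorem absD_get? (d : PySem.Dict Int (Int × Int × Int)) (j : Int) :
    (absD d).get? j = (d.get? j).map encT := by
  simp [absD, PySem.Dict.get?, List.find?_map, Function.comp_def, Option.map_map]

theorem absD_insert (d : PySem.Dict Int (Int × Int × Int)) (j : Int) (w : Int × Int × Int) :
    absD (d.insert j w) = (absD d).insert j (encT w) := by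
  simp only [PySem.Dict.insert, absD_contains]
  by_cases h : d.contains j = true
  · simp only [h, if_true, absD, List.map_map]
    congr 1
    apply List.map_congr_left
    intro p _
    by_cases hp : p.1 = j <;> simp [hp]
  · simp [eq_false_of_ne_true h, absD]

theorem enc_mod_total (t : Int × Int × Int) (v : Int) :
    (encT t).modify "total_utility_as_next" 0 (· + v) = encT (t.1 + v, t.2.1, t.2.2) := rfl

theorem enc_mod_count (t : Int × Int × Int) (v : Int) :
    (encT t).modify "count_in_paths" 0 (· + v) = encT (t.1, t.2.1, t.2.2 + v) := rfl

theorem enc_mod_pot (t : Int × Int × Int) (v : Int) :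
    (encT t).modify "potential_utility_if_chosen" 0 (· + v) = encT (t.1, t.2.1 + v, t.2.2) := rfl

theorem foldl_if_ne_sum (u : Int → Int) (pc j : Int) :
    ∀ (l : List Int) (init : Int),
      l.foldl (fun acc o => if o ≠ j then acc + u o * pc else acc) init
        = init + ((l.map u).sum - (l.count j : Int) * u j) * pc := by
  intro l
  induction l with
  | nil => intro init; simp
  | cons x xs ih =>
    intro init
    by_cases hx : x = j
    · subst hx
      rw [List.foldl_cons, if_neg (by simp : ¬ (x ≠ x)), ih]
      simp only [List.map_cons, List.sum_cons, List.count_cons_self]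
      push_cast
      ring
    · simp only [List.foldl_cons, if_pos hx, List.map_cons, List.sum_cons,
        List.count_cons_of_ne hx, ih]
      ring_nf

theorem cp_fold (iu : List (Int × Int)) (l : List Int) :
    l.foldl (fun (st : PySem.Dict Int Int × Int) x =>
        (st.1.insert x (st.1.getD x 0 + 1), st.2 + (PySem.Dict.mk iu).getD x 0))
      (PySem.Dict.empty, 0)
    = (l.foldl (fun d x => d.insert x (d.getD x 0 + 1)) PySem.Dict.empty,
       (l.map (fun x => (PySem.Dict.mk iu).getD x 0)).sum) := by
  rw [PySem.List.foldl_prod_mk (fun (d : PySem.Dict Int Int) x => d.insert x (d.getD x 0 + 1))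
        (fun s x => s + (PySem.Dict.mk iu).getD x 0)]
  rw [PySem.List.foldl_add]
  simp

theorem absD_getD_of_contains (d : PySem.Dict Int (Int × Int × Int)) (j : Int)
    (h : d.contains j = true) :
    (absD d).getD j PySem.Dict.empty = encT (d.getD j (0, 0, 0)) := by
  rw [PySem.Dict.contains_eq_isSome_get?] at h
  obtain ⟨t, ht⟩ := Option.isSome_iff_exists.mp h
  rw [PySem.Dict.getD_eq_get?_getD, absD_get?, ht, PySem.Dict.getD_eq_get?_getD, ht]
  rfl

theorem step_comm (iu : List (Int × Int)) (l : List Int) (u_p pc : Int)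
    (counts : PySem.Dict Int Int) (pu : Int) (d : PySem.Dict Int (Int × Int × Int)) (j : Int)
    (hc : counts.getD j 0 = (l.count j : Int))
    (hp : pu = (l.map (fun x => (PySem.Dict.mk iu).getD x 0)).sum) :
    (((if (absD d).contains j then absD d
        else (absD d).insert j (PySem.Dict.mk
          [("total_utility_as_next", (0 : Int)),
           ("potential_utility_if_chosen", (0 : Int)),
           ("count_in_paths", (0 : Int))])).modify j PySem.Dict.empty
        (fun e => e.modify "total_utility_as_next" 0
          (· + ((PySem.Dict.mk iu).getD j 0 * pc + u_p)))).modify j PySem.Dict.empty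
        (fun e => e.modify "count_in_paths" 0 (· + pc))).modify j PySem.Dict.empty
        (fun e => e.modify "potential_utility_if_chosen" 0
          (· + l.foldl (fun acc o =>
                 if o ≠ j then acc + (PySem.Dict.mk iu).getD o 0 * pc else acc)
               ((PySem.Dict.mk iu).getD j 0 * pc + u_p)))
    = absD (d.insert j
        ((d.getD j (0, 0, 0)).1 + ((PySem.Dict.mk iu).getD j 0 * pc + u_p),
         (d.getD j (0, 0, 0)).2.1 + (((PySem.Dict.mk iu).getD j 0 * pc + u_p)
            + (pu - counts.getD j 0 * (PySem.Dict.mk iu).getD j 0) * pc),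
         (d.getD j (0, 0, 0)).2.2 + pc)) := by
  have hd' : (if (absD d).contains j then absD d
      else (absD d).insert j (PySem.Dict.mk
        [("total_utility_as_next", (0 : Int)),
         ("potential_utility_if_chosen", (0 : Int)),
         ("count_in_paths", (0 : Int))]))
      = absD (if d.contains j then d else d.insert j (0, 0, 0)) := by
    rw [absD_contains]
    by_cases h : d.contains j = true
    · simp [h]
    · simp only [h, if_false, Bool.false_eq_true]
      rw [absD_insert]
      rfl
  rw [hd']
  set d' := if d.contains j then d else d.insert j (0, 0, 0) with hd'def
  have hcont : d'.contains j = true := by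
    rw [hd'def]; by_cases h : d.contains j = true
    · simp [h]
    · simp only [h, if_false, Bool.false_eq_true]
      exact PySem.Dict.contains_insert_self d j (0, 0, 0)
  have ht : d'.getD j (0, 0, 0) = d.getD j (0, 0, 0) := by
    rw [hd'def]; by_cases h : d.contains j = true
    · simp [h]
    · simp only [h, if_false, Bool.false_eq_true]
      rw [PySem.Dict.getD_insert_self, PySem.Dict.getD_of_not_contains d _ (by simp [h])]
  have hins : ∀ w, d'.insert j w = d.insert j w := by
    intro w; rw [hd'def]; by_cases h : d.contains j = true
    · simp [h]
    · simp only [h, if_false, Bool.false_eq_true]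
      exact PySem.Dict.insert_insert_self d j (0, 0, 0) w
  have h1 : (absD d').modify j PySem.Dict.empty
      (fun e => e.modify "total_utility_as_next" 0
        (· + ((PySem.Dict.mk iu).getD j 0 * pc + u_p)))
      = (absD d').insert j (encT ((d'.getD j (0, 0, 0)).1
          + ((PySem.Dict.mk iu).getD j 0 * pc + u_p),
          (d'.getD j (0, 0, 0)).2.1, (d'.getD j (0, 0, 0)).2.2)) := by
    rw [PySem.Dict.modify, absD_getD_of_contains d' j hcont, enc_mod_total]
  have h2 : ∀ v : Int × Int × Int,
      ((absD d').insert j (encT v)).modify j PySem.Dict.empty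
        (fun e => e.modify "count_in_paths" 0 (· + pc))
      = (absD d').insert j (encT (v.1, v.2.1, v.2.2 + pc)) := by
    intro v
    rw [PySem.Dict.modify, PySem.Dict.getD_insert_self, enc_mod_count,
      PySem.Dict.insert_insert_self]
  have h3 : ∀ (v : Int × Int × Int) (P : Int),
      ((absD d').insert j (encT v)).modify j PySem.Dict.empty
        (fun e => e.modify "potential_utility_if_chosen" 0 (· + P))
      = (absD d').insert j (encT (v.1, v.2.1 + P, v.2.2)) := by
    intro v P
    rw [PySem.Dict.modify, PySem.Dict.getD_insert_self, enc_mod_pot,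
      PySem.Dict.insert_insert_self]
  rw [h1, h2, h3, foldl_if_ne_sum (fun x => (PySem.Dict.mk iu).getD x 0) pc j l,
    ← absD_insert, hins, ht, hc, hp]

theorem path_comm (iu : List (Int × Int)) (l : List Int) (u_p pc : Int)
    (counts : PySem.Dict Int Int) (pu : Int)
    (hc : ∀ j, counts.getD j 0 = (l.count j : Int))
    (hp : pu = (l.map (fun x => (PySem.Dict.mk iu).getD x 0)).sum)
    (it : List Int) (d : PySem.Dict Int (Int × Int × Int)) :
    it.foldl (fun local_header item_j =>
      let local_header :=
        if local_header.contains item_j then local_header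
        else local_header.insert item_j (PySem.Dict.mk
          [("total_utility_as_next", (0 : Int)),
           ("potential_utility_if_chosen", (0 : Int)),
           ("count_in_paths", (0 : Int))])
      let utility_of_j_segment := (PySem.Dict.mk iu).getD item_j 0 * pc
      let local_header := local_header.modify item_j PySem.Dict.empty
        (fun e => e.modify "total_utility_as_next" 0 (· + (utility_of_j_segment + u_p)))
      let local_header := local_header.modify item_j PySem.Dict.empty
        (fun e => e.modify "count_in_paths" 0 (· + pc))
      let current_path_potential_for_j :=
        l.foldl (fun acc other_item =>
          if other_item ≠ item_j then acc + (PySem.Dict.mk iu).getD other_item 0 * pc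
          else acc) (utility_of_j_segment + u_p)
      local_header.modify item_j PySem.Dict.empty
        (fun e => e.modify "potential_utility_if_chosen" 0 (· + current_path_potential_for_j)))
      (absD d)
    = absD (it.foldl (fun acc j =>
        let uj := (PySem.Dict.mk iu).getD j 0
        let base := uj * pc + u_p
        let pot := base + (pu - counts.getD j 0 * uj) * pc
        let t := acc.getD j ((0 : Int), (0 : Int), (0 : Int))
        acc.insert j (t.1 + base, t.2.1 + pot, t.2.2 + pc)) d) :=
  List.foldl_hom absD
    (fun d j => step_comm iu l u_p pc counts pu d j (hc j) hp)

theorem db_comm (iu : List (Int × Int)) (db : List (List Int × Int × Int))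
    (d : PySem.Dict Int (Int × Int × Int)) :
    db.foldl (fun local_header row =>
      match row with
      | (further_prefix_items_set, utility_of_p_in_that_path, path_count) =>
        further_prefix_items_set.foldl (fun local_header item_j =>
          let local_header :=
            if local_header.contains item_j then local_header
            else local_header.insert item_j (PySem.Dict.mk
              [("total_utility_as_next", (0 : Int)),
               ("potential_utility_if_chosen", (0 : Int)),
               ("count_in_paths", (0 : Int))])
          let utility_of_j_segment := (PySem.Dict.mk iu).getD item_j 0 * path_count
          let local_header := local_header.modify item_j PySem.Dict.empty
            (fun e => e.modify "total_utility_as_next" 0 (· + (utility_of_j_segment + utility_of_p_in_that_path)))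
          let local_header := local_header.modify item_j PySem.Dict.empty
            (fun e => e.modify "count_in_paths" 0 (· + path_count))
          let current_path_potential_for_j :=
            further_prefix_items_set.foldl (fun acc other_item =>
              if other_item ≠ item_j then acc + (PySem.Dict.mk iu).getD other_item 0 * path_count
              else acc) (utility_of_j_segment + utility_of_p_in_that_path)
          local_header.modify item_j PySem.Dict.empty
            (fun e => e.modify "potential_utility_if_chosen" 0 (· + current_path_potential_for_j)))
          local_header)
      (absD d)
    = absD (db.foldl (fun acc row =>
        match row with
        | (path_items, utility_of_p, path_count) =>
          let cp := path_items.foldl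
            (fun (st : PySem.Dict Int Int × Int) x =>
              (st.1.insert x (st.1.getD x 0 + 1), st.2 + (PySem.Dict.mk iu).getD x 0))
            (PySem.Dict.empty, 0)
          let counts := cp.1
          let path_util := cp.2
          path_items.foldl (fun acc j =>
            let uj := (PySem.Dict.mk iu).getD j 0
            let base := uj * path_count + utility_of_p
            let pot := base + (path_util - counts.getD j 0 * uj) * path_count
            let t := acc.getD j ((0 : Int), (0 : Int), (0 : Int))
            acc.insert j (t.1 + base, t.2.1 + pot, t.2.2 + path_count)) acc) d) :=
  List.foldl_hom absD
    (fun d row =>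
      match row with
      | (l, u_p, pc) =>
        path_comm iu l u_p pc
          (l.foldl (fun (st : PySem.Dict Int Int × Int) x =>
              (st.1.insert x (st.1.getD x 0 + 1), st.2 + (PySem.Dict.mk iu).getD x 0))
            (PySem.Dict.empty, 0)).1
          (l.foldl (fun (st : PySem.Dict Int Int × Int) x =>
              (st.1.insert x (st.1.getD x 0 + 1), st.2 + (PySem.Dict.mk iu).getD x 0))
            (PySem.Dict.empty, 0)).2
          (fun j => by
            rw [cp_fold]
            simp [PySem.Dict.getD_foldl_insert_add_one])
          (by rw [cp_fold])
          l d)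

theorem main_thm (db : List (List Int × Int × Int)) (iu : List (Int × Int)) :
    build_local_header_info db iu = build_local_header_info_alt db iu := by
  simp only [build_local_header_info, build_local_header_info_alt]
  have h := db_comm iu db PySem.Dict.empty
  rw [show (absD PySem.Dict.empty) = PySem.Dict.empty from rfl] at h
  rw [h]
  simp [absD, List.map_map, encT, Function.comp_def]


-- ===== VERDICT (by name: the statement is the Claim_ definition above) =====
theorem build_local_header_info_spec : Claim_equal_build_local_header_info := by
  intro projected_db_for_prefix_p item_utils _
  unfold Spec_build_local_header_info
  exact main_thm projected_db_for_prefix_p item_utils
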